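-- pv_equiv track=rewrite | github.com/xriva/coding-contest | google/kickstart/2020/F/metalharvest/harvest.py | solve
-- ===== SOURCE A (Python) =====
-- from bisect import bisect
--
-- def solve(N,K,SE):
--     i=0
--     cnt=0
--     x = SE[0][0]
--     while i<N:
--         r = SE[i][1]-x
--         t = r//K + (1 if r % K else 0)
--         cnt+=t
--         y = x+K*t
--
--         j = bisect(SE,(y,0))-1
--         if y>=SE[j][1]:
--             i = j+1
--             if i<N:
--                 x = SE[i][0]
--         else:
--             x = y
--             i = j
--
--     return cnt
-- ===== SOURCE B (Python) =====
-- def solve(N, K, SE):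
--     cnt = 0
--     y = None  # right end of the last harvested block, or None if nothing harvested yet
--     for i in range(N):
--         s, e = SE[i]
--         x = s if y is None or y < s else y
--         if x < e:
--             t = -(-(e - x) // K)  # ceil((e - x) / K)
--             cnt += t
--             y = x + t * K
--     return cnt
-- ===== Notes on version B (the rewrite author's own statement) =====
-- stated objective: alternative
-- what changed: B makes a single forward pass over the first N segments with a running frontier y (the index only moves forward), removing the per-placement bisect search over the whole list that A performs.
-- outside the precondition, e.g. on solve(1, 2, [(5, 2), (0, 5)]): A returns -1, B returns 0; on solve(1, -1, [(3, -2), (-2, -2)]): A returns 5, B returns 0; on solve(2, 1, [(2, 2), (-5,), (1, 0)]): A returns 0, B raises ValueError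
import Mathlib
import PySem

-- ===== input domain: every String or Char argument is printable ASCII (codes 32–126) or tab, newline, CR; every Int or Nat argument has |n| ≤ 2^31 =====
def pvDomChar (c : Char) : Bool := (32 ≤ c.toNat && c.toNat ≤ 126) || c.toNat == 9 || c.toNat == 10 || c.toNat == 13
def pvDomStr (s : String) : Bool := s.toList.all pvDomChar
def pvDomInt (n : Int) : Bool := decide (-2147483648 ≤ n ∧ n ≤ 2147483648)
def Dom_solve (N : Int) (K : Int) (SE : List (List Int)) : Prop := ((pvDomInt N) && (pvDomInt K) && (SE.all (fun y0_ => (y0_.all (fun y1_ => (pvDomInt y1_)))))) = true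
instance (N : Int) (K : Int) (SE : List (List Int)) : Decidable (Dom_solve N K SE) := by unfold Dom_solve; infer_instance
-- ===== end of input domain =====

-- B replaces A's bisect-driven index jumps by a single forward pass holding a running frontier:
-- the index only ever moves forward, so no per-placement search over the list is needed.

-- ===== PORT A =====
-- the `while i < N` loop of A, fuel-based (on Pre_solve inputs at most N iterations run, proved below);
-- Python's bisect(SE, (y, 0)) is PySem.List.bisectRight SE [y, 0] (tuples/lists compare lexicographically);
-- where Python would raise (index out of range, K = 0) the PySem defaults apply — all outside Pre_solve
def pvSolveLoopA (N : Int) (K : Int) (SE : List (List Int)) : Nat → Int → Int → Int → Int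
  | 0, _, _, cnt => cnt
  | fuel + 1, i, x, cnt =>
    if i < N then
      let r := PySem.List.pyGetD (PySem.List.pyGetD SE i []) 1 0 - x
      let t := PySem.Int.floordiv r K + (if PySem.Int.mod r K ≠ 0 then 1 else 0)
      let cnt' := cnt + t
      let y := x + K * t
      let j : Int := (PySem.List.bisectRight SE [y, 0] : Int) - 1
      if y ≥ PySem.List.pyGetD (PySem.List.pyGetD SE j []) 1 0 then
        let i' := j + 1
        let x' := if i' < N then PySem.List.pyGetD (PySem.List.pyGetD SE i' []) 0 0 else x
        pvSolveLoopA N K SE fuel i' x' cnt'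
      else
        pvSolveLoopA N K SE fuel j y cnt'
    else cnt

def solve (N : Int) (K : Int) (SE : List (List Int)) : Int :=
  pvSolveLoopA N K SE (N.toNat + 1) 0 (PySem.List.pyGetD (PySem.List.pyGetD SE 0 []) 0 0) 0

-- ===== PORT B =====
-- the `for i in range(N)` pass of Source B over the first N segments; `s, e = SE[i]` is the two getD's
-- (Python raises unless the segment is a pair — Pre_solve guarantees that)
def pvSolveLoopB (K : Int) : List (List Int) → Option Int → Int → Int
  | [], _, cnt => cnt
  | seg :: rest, y, cnt =>
    let s := seg.getD 0 0
    let e := seg.getD 1 0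
    let x := match y with
             | none => s
             | some yv => if yv < s then s else yv
    if x < e then
      let t := -(PySem.Int.floordiv (-(e - x)) K)
      pvSolveLoopB K rest (some (x + t * K)) (cnt + t)
    else
      pvSolveLoopB K rest y cnt

def solve_alt (N : Int) (K : Int) (SE : List (List Int)) : Int :=
  pvSolveLoopB K (SE.take N.toNat) none 0

-- ===== PRECONDITION & SPEC =====
-- Pre_solve is the solver's natural domain (the contest's guaranteed input shape): K ≥ 1 and the first
-- N segments exist and are (s, e) pairs, nonempty (s < e), sorted and disjoint (e ≤ next s) — the shape
-- bisect's contract requires — plus the degenerate N ≤ 0 inputs A accepts (it returns 0 there).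
-- It DOES exclude inputs A still returns on (unsorted or overlapping segments, e ≤ s, K ≤ 0, tuples of
-- other arity, N > len(SE)): there bisect's jumps over malformed data yield accidental values (A loops
-- forever on many of them), which no caller would specify; see the cited examples in the claim.
def Pre_solve (N : Int) (K : Int) (SE : List (List Int)) : Prop :=
  (SE ≠ [] ∧ SE.headD [] ≠ [] ∧ N ≤ 0) ∨
  (0 < N ∧ N ≤ (SE.length : Int) ∧ 1 ≤ K
    ∧ (∀ p ∈ SE, p.length = 2)
    ∧ (∀ p ∈ SE, p.getD 0 0 < p.getD 1 0)
    ∧ SE.IsChain (fun p q => p.getD 1 0 ≤ q.getD 0 0))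
instance (N : Int) (K : Int) (SE : List (List Int)) : Decidable (Pre_solve N K SE) := by
  unfold Pre_solve; infer_instance

def pvWitness_solve : Int × Int × List (List Int) := (2, 3, [[0, 5], [10, 12]])

def Spec_solve (N : Int) (K : Int) (SE : List (List Int)) (out : Int) : Prop := out = solve_alt N K SE
instance (N : Int) (K : Int) (SE : List (List Int)) (out : Int) : Decidable (Spec_solve N K SE out) := by
  unfold Spec_solve; infer_instance

-- ===== CLAIM (what is proved, stated in full; the proofs are below) =====
def Claim_equal_solve : Prop := ∀ (N : Int) (K : Int) (SE : List (List Int)), Dom_solve N K SE → Pre_solve N K SE → Spec_solve N K SE (solve N K SE)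

-- ===== LEMMAS AND PROOFS =====

-- segment accessors: start and end of a segment (a length-2 list)
def sgS (p : List Int) : Int := p.getD 0 0
def sgE (p : List Int) : Int := p.getD 1 0
-- the k-th segment, total
def sgAt (SE : List (List Int)) (k : Nat) : List Int := SE.getD k []

-- Python's lexicographic comparison of the probe (y, 0) with a pair
theorem lex2_lt (y a b : Int) : (([y, 0] : List Int) < [a, b]) ↔ (y < a ∨ (y = a ∧ (0:Int) < b)) := by
  simp [List.cons_lt_cons_iff]

-- bisect_right's loop meets its boundary spec for a monotone probe (PySem's bisectRight_spec is stated
-- for List Int only; this is the same fact for our element type List Int-lists)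
theorem bisectLoop_spec (xs : List (List Int)) (x : List Int)
    (hmono : ∀ m n (hm : m < xs.length) (hn : n < xs.length), m ≤ n → x < xs[m] → x < xs[n]) :
    ∀ (fuel lo hi : Nat), lo ≤ hi → hi ≤ xs.length → hi - lo ≤ fuel →
    (∀ m (hm : m < xs.length), m < lo → ¬ x < xs[m]) →
    (∀ m (hm : m < xs.length), hi ≤ m → x < xs[m]) →
    lo ≤ PySem.List.bisectRightLoop xs x fuel lo hi ∧
    PySem.List.bisectRightLoop xs x fuel lo hi ≤ hi ∧
    (∀ m (hm : m < xs.length), m < PySem.List.bisectRightLoop xs x fuel lo hi → ¬ x < xs[m]) ∧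
    (∀ m (hm : m < xs.length), PySem.List.bisectRightLoop xs x fuel lo hi ≤ m → x < xs[m]) := by
  intro fuel
  induction fuel with
  | zero =>
    intro lo hi h1 h2 h3 hlow hhigh
    have hlh : lo = hi := by omega
    have h0 : PySem.List.bisectRightLoop xs x 0 lo hi = lo := by rw [PySem.List.bisectRightLoop]
    rw [h0]
    exact ⟨le_refl _, by omega, hlow, fun m hm hge => hhigh m hm (by omega)⟩
  | succ fuel ih =>
    intro lo hi h1 h2 h3 hlow hhigh
    by_cases hlh : lo < hi
    · have hmid : (lo + hi) / 2 < xs.length := by omega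
      have hstep : PySem.List.bisectRightLoop xs x (fuel + 1) lo hi =
          if x < xs[(lo + hi) / 2] then PySem.List.bisectRightLoop xs x fuel lo ((lo + hi) / 2)
          else PySem.List.bisectRightLoop xs x fuel ((lo + hi) / 2 + 1) hi := by
        rw [PySem.List.bisectRightLoop]
        simp only [if_pos hlh]
        rw [List.getElem?_eq_getElem hmid]
      rw [hstep]
      by_cases hx : x < xs[(lo + hi) / 2]
      · rw [if_pos hx]
        have h' := ih lo ((lo + hi) / 2) (by omega) (by omega) (by omega) hlow
          (fun m hm hge => hmono ((lo + hi) / 2) m hmid hm hge hx)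
        exact ⟨h'.1, le_trans h'.2.1 (by omega), h'.2.2.1, h'.2.2.2⟩
      · rw [if_neg hx]
        have h' := ih ((lo + hi) / 2 + 1) hi (by omega) h2 (by omega)
          (fun m hm hlt hxm => hx (hmono m ((lo + hi) / 2) hm hmid (by omega) hxm)) hhigh
        exact ⟨le_trans (by omega) h'.1, h'.2.1, h'.2.2.1, h'.2.2.2⟩
    · have h0 : PySem.List.bisectRightLoop xs x (fuel + 1) lo hi = lo := by
        rw [PySem.List.bisectRightLoop]
        simp only [if_neg hlh]
      rw [h0]
      exact ⟨le_refl _, h1, hlow, fun m hm hge => hhigh m hm (by omega)⟩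

theorem bisect_spec (xs : List (List Int)) (x : List Int)
    (hmono : ∀ m n (hm : m < xs.length) (hn : n < xs.length), m ≤ n → x < xs[m] → x < xs[n]) :
    PySem.List.bisectRight xs x ≤ xs.length ∧
    (∀ m (hm : m < xs.length), m < PySem.List.bisectRight xs x → ¬ x < xs[m]) ∧
    (∀ m (hm : m < xs.length), PySem.List.bisectRight xs x ≤ m → x < xs[m]) := by
  have h := bisectLoop_spec xs x hmono xs.length 0 xs.length (by omega) (le_refl _) (by omega)
    (by omega) (fun m hm hge => by omega)
  rw [PySem.List.bisectRight]
  exact ⟨h.2.1, h.2.2.1, h.2.2.2⟩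

-- on a sorted disjoint segment list, ends stay left of later starts
theorem segE_le_segS (SE : List (List Int))
    (hse : ∀ p ∈ SE, sgS p < sgE p)
    (hch : SE.IsChain (fun p q => sgE p ≤ sgS q)) :
    ∀ m n, m < n → (hn : n < SE.length) → sgE (sgAt SE m) ≤ sgS (sgAt SE n) := by
  have hat : ∀ k (hk : k < SE.length), sgAt SE k = SE[k] := fun k hk => List.getD_eq_getElem SE [] hk
  have hc : ∀ i (hi : i + 1 < SE.length), sgE SE[i] ≤ sgS SE[i+1] :=
    fun i hi => List.IsChain.getElem hch i hi
  intro m n hmn hn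
  induction n with
  | zero => omega
  | succ n ihn =>
    rw [hat m (by omega), hat (n+1) hn]
    rcases Nat.lt_or_ge m n with h | h
    · have h1 := ihn h (by omega)
      rw [hat m (by omega), hat n (by omega)] at h1
      have h2 : sgS SE[n] < sgE SE[n] := hse _ (List.getElem_mem _)
      exact le_trans h1 (le_trans (le_of_lt h2) (hc n hn))
    · have hmn' : m = n := by omega
      subst hmn'
      exact hc m hn

-- ceil division brackets its argument
theorem ceil_bounds (K r : Int) (hK : 1 ≤ K) :
    r ≤ -(PySem.Int.floordiv (-r) K) * K ∧ (-(PySem.Int.floordiv (-r) K) - 1) * K < r := by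
  have h := (PySem.Int.neg_floordiv_neg_eq_iff_of_pos
      (a := r) (b := K) (q := -(PySem.Int.floordiv (-r) K)) (by omega)).mp rfl
  exact ⟨h.2, h.1⟩

-- ceil division: r//K + (1 if r%K else 0)  =  -((-r)//K)   (K ≥ 1)
theorem ceil_eq (K r : Int) (hK : 1 ≤ K) :
    PySem.Int.floordiv r K + (if PySem.Int.mod r K ≠ 0 then 1 else 0)
      = -(PySem.Int.floordiv (-r) K) := by
  have hKpos : (0:Int) < K := by omega
  have hqm := PySem.Int.floordiv_mul_add_mod r K
  have hm0 := PySem.Int.mod_nonneg r hKpos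
  have hmK := PySem.Int.mod_lt r hKpos
  have hc := ceil_bounds K r hK
  set q := PySem.Int.floordiv r K with hq
  set m := PySem.Int.mod r K with hm
  set c := -(PySem.Int.floordiv (-r) K) with hcdef
  by_cases hmz : m = 0
  · have h1 : (c - 1) * K < q * K := by linarith
    have h2 : q * K ≤ c * K := by linarith
    have h1' : c - 1 < q := lt_of_mul_lt_mul_right h1 (by omega)
    have h2' : q ≤ c := le_of_mul_le_mul_right h2 hKpos
    simp only [hmz, ne_eq, not_true_eq_false, if_false]
    omega
  · have hmpos : 0 < m := lt_of_le_of_ne hm0 (Ne.symm hmz)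
    have hexp : (q + 1) * K = q * K + K := by ring
    have h1 : q * K < c * K := by linarith
    have h2 : (c - 1) * K < (q + 1) * K := by linarith
    have h1' : q < c := lt_of_mul_lt_mul_right h1 (by omega)
    have h2' : c - 1 < q + 1 := lt_of_mul_lt_mul_right h2 (by omega)
    simp only [hmz, ne_eq, not_false_eq_true, if_true]
    omega

-- B's pass skips every segment that ends at or before the frontier
theorem B_skip (K y cnt : Int) (SEN : List (List Int)) :
    ∀ (d a : Nat),
    (∀ m, a ≤ m → m < a + d → (hm : m < SEN.length) →
        sgS SEN[m] ≤ y ∧ sgE SEN[m] ≤ y) →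
    pvSolveLoopB K (SEN.drop a) (some y) cnt = pvSolveLoopB K (SEN.drop (a + d)) (some y) cnt := by
  intro d
  induction d with
  | zero => intro a _; rfl
  | succ d ih =>
    intro a h
    by_cases ha : a < SEN.length
    · obtain ⟨hS, hE⟩ := h a (le_refl _) (by omega) ha
      have hS' : SEN[a].getD 0 0 ≤ y := hS
      have hE' : SEN[a].getD 1 0 ≤ y := hE
      rw [List.drop_eq_getElem_cons ha]
      have hstep : pvSolveLoopB K (SEN[a] :: SEN.drop (a + 1)) (some y) cnt
          = pvSolveLoopB K (SEN.drop (a + 1)) (some y) cnt := by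
        simp only [pvSolveLoopB]
        rw [if_neg (not_lt.mpr hS')]
        rw [if_neg (not_lt.mpr hE')]
      rw [hstep, show a + (d + 1) = (a + 1) + d by omega]
      exact ih (a + 1) (fun m h1 h2 hm => h m (by omega) (by omega) hm)
    · rw [List.drop_eq_nil_of_le (by omega), List.drop_eq_nil_of_le (by omega)]

-- one iteration of A's while loop, unfolded
theorem stepA (N K : Int) (SE : List (List Int)) (f : Nat) (i x cnt : Int) (hi : i < N) :
    pvSolveLoopA N K SE (f + 1) i x cnt =
      (let r := PySem.List.pyGetD (PySem.List.pyGetD SE i []) 1 0 - x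
       let t := PySem.Int.floordiv r K + (if PySem.Int.mod r K ≠ 0 then 1 else 0)
       let cnt' := cnt + t
       let y := x + K * t
       let j : Int := (PySem.List.bisectRight SE [y, 0] : Int) - 1
       if y ≥ PySem.List.pyGetD (PySem.List.pyGetD SE j []) 1 0 then
         pvSolveLoopA N K SE f (j + 1)
           (if j + 1 < N then PySem.List.pyGetD (PySem.List.pyGetD SE (j + 1) []) 0 0 else x) cnt'
       else pvSolveLoopA N K SE f j y cnt') := by
  rw [pvSolveLoopA, if_pos hi]

-- one iteration of B's pass on a segment it must harvest
theorem stepB (K : Int) (seg : List Int) (rest : List (List Int)) (yo : Option Int) (cnt x : Int)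
    (hx : x = match yo with
              | none => seg.getD 0 0
              | some v => if v < seg.getD 0 0 then seg.getD 0 0 else v)
    (hlt : x < seg.getD 1 0) :
    pvSolveLoopB K (seg :: rest) yo cnt =
      pvSolveLoopB K rest
        (some (x + -(PySem.Int.floordiv (-(seg.getD 1 0 - x)) K) * K))
        (cnt + -(PySem.Int.floordiv (-(seg.getD 1 0 - x)) K)) := by
  rcases yo with _ | v <;> simp only [pvSolveLoopB] <;> simp only at hx <;>
    rw [← hx, if_pos hlt]

-- MAIN: from any loop state of A (current segment k, position x inside it), A's remaining run equals
-- B's pass over the remaining segments with the matching frontier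
theorem mainA (N K : Int) (SE : List (List Int))
    (hN : 0 < N) (hNlen : N ≤ (SE.length : Int)) (hK : 1 ≤ K)
    (hlen2 : ∀ p ∈ SE, p.length = 2)
    (hse : ∀ p ∈ SE, sgS p < sgE p)
    (hch : SE.IsChain (fun p q => sgE p ≤ sgS q)) :
    ∀ (fuel k : Nat) (x cnt : Int) (yo : Option Int),
    k < N.toNat → N.toNat - k < fuel →
    x < sgE (sgAt SE k) →
    ((yo = none ∧ x = sgS (sgAt SE k)) ∨
     (∃ v, yo = some v ∧ x = (if v < sgS (sgAt SE k) then sgS (sgAt SE k) else v))) →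
    pvSolveLoopA N K SE fuel (↑k) x cnt = pvSolveLoopB K ((SE.take N.toNat).drop k) yo cnt := by
  have hat : ∀ m (hm : m < SE.length), sgAt SE m = SE[m] :=
    fun m hm => List.getD_eq_getElem SE [] hm
  have hlen : N.toNat ≤ SE.length := by omega
  have hlex : ∀ (y : Int) (m : Nat) (hm : m < SE.length),
      (([y, 0] : List Int) < SE[m]) ↔
        (y < sgS (sgAt SE m) ∨ (y = sgS (sgAt SE m) ∧ 0 < sgE (sgAt SE m))) := by
    intro y m hm
    obtain ⟨a, b, hab⟩ := List.length_eq_two.mp (hlen2 _ (List.getElem_mem hm))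
    rw [hat m hm, hab]
    simp [sgS, sgE, lex2_lt]
  have hmono : ∀ (y : Int), ∀ m n (hm : m < SE.length) (hn : n < SE.length), m ≤ n →
      ([y, 0] : List Int) < SE[m] → ([y, 0] : List Int) < SE[n] := by
    intro y m n hm hn hmn hlt
    rcases Nat.eq_or_lt_of_le hmn with h | h
    · subst h; exact hlt
    · have h1 : y ≤ sgS (sgAt SE m) := by
        rcases (hlex y m hm).mp hlt with h' | h' <;> omega
      have h2 : sgS (sgAt SE m) < sgS (sgAt SE n) := by
        have hm1 : sgS (sgAt SE m) < sgE (sgAt SE m) := by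
          rw [hat m hm]; exact hse _ (List.getElem_mem hm)
        have hm2 := segE_le_segS SE hse hch m n h hn
        omega
      exact (hlex y n hn).mpr (Or.inl (by omega))
  intro fuel
  induction fuel with
  | zero => intro k x cnt yo hkN hf; exact absurd hf (by omega)
  | succ f ih =>
    intro k x cnt yo hkN hf hxE hyo
    have hklen : k < SE.length := by omega
    have hkI : ((k : Nat) : Int) < N := by omega
    have hSx : sgS (sgAt SE k) ≤ x := by
      rcases hyo with ⟨_, hxv⟩ | ⟨v, _, hxv⟩
      · omega
      · rw [hxv]; split <;> omega
    have hpy1 : PySem.List.pyGetD (PySem.List.pyGetD SE ((k : Nat) : Int) []) 1 0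
        = sgE (sgAt SE k) := by
      simp [pysem, sgE, sgAt]
    rw [stepA N K SE f (↑k) x cnt hkI]
    simp only [hpy1, ceil_eq K (sgE (sgAt SE k) - x) hK]
    obtain ⟨hcb1, hcb2⟩ := ceil_bounds K (sgE (sgAt SE k) - x) hK
    set c := -(PySem.Int.floordiv (-(sgE (sgAt SE k) - x)) K) with hcdef
    have hKc : sgE (sgAt SE k) - x ≤ K * c := by rw [mul_comm]; exact hcb1
    set y := x + K * c with hydef
    have hEy : sgE (sgAt SE k) ≤ y := by omega
    have hxy : x < y := by omega
    set jn := PySem.List.bisectRight SE [y, 0] with hjndef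
    obtain ⟨hjnlen, hjlo, hjhi⟩ := bisect_spec SE [y, 0] (hmono y)
    have hSmy : ∀ m (hm : m < SE.length), m < jn → sgS (sgAt SE m) ≤ y := by
      intro m hm hlt
      have h' := hjlo m hm hlt
      rw [hlex y m hm] at h'
      omega
    have hySm : ∀ m (hm : m < SE.length), jn ≤ m → y ≤ sgS (sgAt SE m) := by
      intro m hm hge
      rcases (hlex y m hm).mp (hjhi m hm hge) with h' | h' <;> omega
    have hkjn : k < jn := by
      by_contra hcon
      have := hySm k hklen (by omega)
      omega
    have hjcast : ((jn : Int) - 1) = (((jn - 1 : Nat) : Nat) : Int) := by omega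
    have hpyj : PySem.List.pyGetD (PySem.List.pyGetD SE ((jn : Int) - 1) []) 1 0
        = sgE (sgAt SE (jn - 1)) := by
      rw [hjcast]; simp [pysem, sgE, sgAt]
    rw [hpyj]
    -- B takes one harvesting step on segment k
    have hkN' : k < (SE.take N.toNat).length := by rw [List.length_take]; omega
    have htake : (SE.take N.toNat)[k]'hkN' = sgAt SE k := (hat k hklen).symm ▸ List.getElem_take
    have hBstep : pvSolveLoopB K ((SE.take N.toNat).drop k) yo cnt
        = pvSolveLoopB K ((SE.take N.toNat).drop (k + 1)) (some y) (cnt + c) := by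
      rw [List.drop_eq_getElem_cons hkN', htake]
      rcases hyo with ⟨hyoe, hxv⟩ | ⟨v, hyoe, hxv⟩ <;> rw [hyoe]
      · rw [stepB K (sgAt SE k) _ none cnt x hxv hxE,
            show (sgAt SE k).getD 1 0 = sgE (sgAt SE k) from rfl, ← hcdef,
            show x + c * K = y by rw [hydef, mul_comm]]
      · rw [stepB K (sgAt SE k) _ (some v) cnt x hxv hxE,
            show (sgAt SE k).getD 1 0 = sgE (sgAt SE k) from rfl, ← hcdef,
            show x + c * K = y by rw [hydef, mul_comm]]
    rw [hBstep]
    simp only [ge_iff_le]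
    by_cases hbr : sgE (sgAt SE (jn - 1)) ≤ y
    · -- full coverage up to segment jn - 1; A jumps to jn
      rw [if_pos hbr]
      have hge : sgE (sgAt SE (jn - 1)) ≤ y := hbr
      have hcond : ∀ m, k + 1 ≤ m → m < min jn N.toNat → (hm : m < (SE.take N.toNat).length) →
          sgS (SE.take N.toNat)[m] ≤ y ∧ sgE (SE.take N.toNat)[m] ≤ y := by
        intro m h1 h2 hm
        have hmlen : m < SE.length := by omega
        have hgm : (SE.take N.toNat)[m] = sgAt SE m := (hat m hmlen).symm ▸ List.getElem_take
        rw [hgm]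
        refine ⟨hSmy m hmlen (by omega), ?_⟩
        rcases Nat.lt_or_ge m (jn - 1) with hc | hc
        · have h3 := segE_le_segS SE hse hch m (m + 1) (by omega) (by omega)
          have h4 := hSmy (m + 1) (by omega) (by omega)
          omega
        · have hmeq : m = jn - 1 := by omega
          rw [hmeq]; exact hge
      have hskip := B_skip K y (cnt + c) (SE.take N.toNat) (min jn N.toNat - (k + 1)) (k + 1)
        (by intro m h1 h2 hm; exact hcond m h1 (by omega) hm)
      rw [show (k + 1) + (min jn N.toNat - (k + 1)) = min jn N.toNat by omega] at hskip
      rw [hskip]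
      rcases Nat.lt_or_ge jn N.toNat with hjN | hjN
      · -- next segment jn exists: A restarts there from its left end
        have hjlenSE : jn < SE.length := by omega
        have hjI : ((jn : Int) - 1) + 1 < N := by omega
        rw [if_pos hjI]
        have harg : ((jn : Int) - 1) + 1 = ((jn : Nat) : Int) := by omega
        rw [harg]
        have hpy0 : PySem.List.pyGetD (PySem.List.pyGetD SE ((jn : Nat) : Int) []) 0 0
            = sgS (sgAt SE jn) := by simp [pysem, sgS, sgAt]
        rw [hpy0, show min jn N.toNat = jn by omega]
        have hyS := hySm jn hjlenSE (le_refl _)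
        refine ih jn (sgS (sgAt SE jn)) (cnt + c) (some y) hjN (by omega) ?_ ?_
        · rw [hat jn hjlenSE]; exact hse _ (List.getElem_mem hjlenSE)
        · exact Or.inr ⟨y, rfl, by split <;> omega⟩
      · -- no segment left: both sides stop with the same count
        have hjI : ¬ (((jn : Int) - 1) + 1 < N) := by omega
        rw [if_neg hjI, show min jn N.toNat = N.toNat by omega]
        rw [show (SE.take N.toNat).drop N.toNat = [] from
          List.drop_eq_nil_of_le (by rw [List.length_take]; omega)]
        rcases f with _ | f'
        · exact absurd hf (by omega)
        · rw [pvSolveLoopA, if_neg (by omega : ¬ ((jn : Int) - 1) + 1 < N)]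
          rfl
    · -- partial coverage: A resumes inside segment jn - 1 at position y
      rw [if_neg hbr]
      have hbr' : y < sgE (sgAt SE (jn - 1)) := lt_of_not_ge hbr
      have hkj1 : k + 1 ≤ jn - 1 := by
        by_contra hcon
        have heq : jn - 1 = k := by omega
        rw [heq] at hbr'
        omega
      have hcond : ∀ m, k + 1 ≤ m → m < min (jn - 1) N.toNat → (hm : m < (SE.take N.toNat).length) →
          sgS (SE.take N.toNat)[m] ≤ y ∧ sgE (SE.take N.toNat)[m] ≤ y := by
        intro m h1 h2 hm
        have hmlen : m < SE.length := by omega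
        have hgm : (SE.take N.toNat)[m] = sgAt SE m := (hat m hmlen).symm ▸ List.getElem_take
        rw [hgm]
        refine ⟨hSmy m hmlen (by omega), ?_⟩
        have h3 := segE_le_segS SE hse hch m (m + 1) (by omega) (by omega)
        have h4 := hSmy (m + 1) (by omega) (by omega)
        omega
      have hskip := B_skip K y (cnt + c) (SE.take N.toNat) (min (jn - 1) N.toNat - (k + 1)) (k + 1)
        (by intro m h1 h2 hm; exact hcond m h1 (by omega) hm)
      rw [show (k + 1) + (min (jn - 1) N.toNat - (k + 1)) = min (jn - 1) N.toNat by omega] at hskip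
      rw [hskip]
      rcases Nat.lt_or_ge (jn - 1) N.toNat with hjN | hjN
      · rw [hjcast, show min (jn - 1) N.toNat = jn - 1 by omega]
        have hj1len : jn - 1 < SE.length := by omega
        have hS1 := hSmy (jn - 1) hj1len (by omega)
        refine ih (jn - 1) y (cnt + c) (some y) hjN (by omega) hbr' ?_
        exact Or.inr ⟨y, rfl, by split <;> omega⟩
      · rw [show min (jn - 1) N.toNat = N.toNat by omega]
        rw [show (SE.take N.toNat).drop N.toNat = [] from
          List.drop_eq_nil_of_le (by rw [List.length_take]; omega)]
        rcases f with _ | f'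
        · exact absurd hf (by omega)
        · rw [pvSolveLoopA, if_neg (by omega : ¬ ((jn : Int) - 1) < N)]
          rfl

-- ===== VERDICT (by name: the statement is the Claim_ definition above) =====
theorem solve_spec : Claim_equal_solve := by
  intro N K SE _ hpre
  unfold Spec_solve
  rcases hpre with ⟨hne, hh, hN⟩ | ⟨hN, hNlen, hK, hlen2, hse, hch⟩
  · unfold solve solve_alt pvSolveLoopA
    have h0 : N.toNat = 0 := Int.toNat_of_nonpos hN
    rw [h0]
    simp [pvSolveLoopB, not_lt.mpr hN]
  · have hlen : 0 < SE.length := by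
      have := hNlen; omega
    have h0 : sgAt SE 0 ∈ SE := by
      unfold sgAt; rw [List.getD_eq_getElem SE [] hlen]; exact List.getElem_mem _
    have hx0 : PySem.List.pyGetD (PySem.List.pyGetD SE (0:Int) []) 0 0 = sgS (sgAt SE 0) := by
      simp [pysem, sgS, sgAt]
    unfold solve solve_alt
    rw [hx0]
    have h := mainA N K SE hN hNlen hK hlen2 hse hch (N.toNat + 1) 0 _ 0 none
      (by omega) (by omega) (hse _ h0) (Or.inl ⟨rfl, rfl⟩)
    simpa using h
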